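-- pv_equiv track=rewrite | github.com/olsenw/LeetCodeExercises | Python3/shifting_letters_II.py | shiftingLetters
-- ===== SOURCE A (Python) =====
-- import heapq
-- from typing import List, Dict, Set, Optional
--
-- def shiftingLetters(s: str, shifts: List[List[int]]) -> str:
--     shifts.sort()
--     j = 0
--     heap = []
--     edit = 0
--     answer = ""
--     for i in range(len(s)):
--         while j < len(shifts) and i == shifts[j][0]:
--             edit += 1 if shifts[j][2] == 1 else -1
--             heapq.heappush(heap, shifts[j][1:])
--             j += 1
--         answer += chr(((ord(s[i]) - 97 + edit) % 26) + 97)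
--         while heap and i == heap[0][0]:
--             edit += 1 if heapq.heappop(heap)[1] == 0 else -1
--     return answer
-- ===== SOURCE B (Python) =====
-- def shiftingLetters(s, shifts):
--     # Difference map + prefix sum. Return value only: unlike the original,
--     # this does not sort `shifts` in place.
--     if not s:
--         return ""
--     diff = {}
--     for l in shifts:
--         st, e, d = l[0], l[1], l[2]
--         delta = 1 if d == 1 else -1
--         diff[st] = diff.get(st, 0) + delta
--         diff[e + 1] = diff.get(e + 1, 0) - delta
--     out = []
--     shift = 0
--     for i, c in enumerate(s):
--         shift += diff.get(i, 0)
--         out.append(chr((ord(c) - 97 + shift) % 26 + 97))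
--     return "".join(out)
-- ===== Notes on version B (the rewrite author's own statement) =====
-- stated objective: alternative
-- what changed: B replaces A's in-place sort of the shift list plus a heap-driven sweep (heappush/heappop per shift) by a difference map filled in one pass over the shifts and a single prefix-sum pass over the string; Pre_ admits any shifts on the empty string and otherwise restricts to the task's natural domain relaxed around the string (triples with 0 <= start <= end, direction in {0,1} when the range ends inside the string, or ranges entirely outside it), excluding malformed shifts on which A raises or returns accidents of its stalled scan / never-retired heap.
-- outside the precondition, e.g. on shiftingLetters('ab', [[-1, 0, 1]]): A returns 'ab', B returns 'aa'; on shiftingLetters('ab', [[1, 0, 1]]): A returns 'ac', B returns 'ab'; on shiftingLetters('abc', [[0, 1, 2]]): A returns 'zaa', B returns 'zac'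
import Mathlib
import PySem

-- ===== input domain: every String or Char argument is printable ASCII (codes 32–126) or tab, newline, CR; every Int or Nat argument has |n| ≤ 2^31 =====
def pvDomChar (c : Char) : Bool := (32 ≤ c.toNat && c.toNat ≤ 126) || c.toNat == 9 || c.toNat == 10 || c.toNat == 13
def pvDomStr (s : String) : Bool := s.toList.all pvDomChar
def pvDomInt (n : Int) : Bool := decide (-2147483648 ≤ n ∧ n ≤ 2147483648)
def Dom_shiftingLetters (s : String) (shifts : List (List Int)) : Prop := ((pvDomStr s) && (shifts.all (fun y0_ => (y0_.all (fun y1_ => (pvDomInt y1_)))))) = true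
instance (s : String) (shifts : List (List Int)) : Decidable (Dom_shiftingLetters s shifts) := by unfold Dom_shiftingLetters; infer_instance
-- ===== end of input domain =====

-- B replaces A's in-place sort + heap sweep by a difference map and one prefix-sum pass;
-- return-value equivalence only: A sorts `shifts` in place, B does not mutate it.

-- ===== PORT A =====
-- chr(((ord c) - 97 + edit) % 26 + 97): Python '%' on a possibly negative left operand is PySem.Int.mod;
-- the result is in [97,122] so Char.ofNat is exact. Shared by both ports (both Pythons contain this expression).
def shiftChar (c : Char) (edit : Int) : Char :=
  Char.ofNat ((PySem.Int.mod ((c.toNat : Int) - 97 + edit) 26 + 97).toNat)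

-- the inner 'while j < len(shifts) and i == shifts[j][0]' loop: `rest` is the suffix of the sorted
-- list from j on; heapq.heappush is ported as ordered insertion (PySem.List.insertBy, the prelude's
-- own sorted-insert), which realises the heap's observable contract (heap[0] is the minimum).
def aPush (i : Int) : List (List Int) → Int → List (List Int) → List (List Int) × Int × List (List Int)
  | [], edit, heap => ([], edit, heap)
  | l :: rest, edit, heap =>
    if i = PySem.List.pyGetD l 0 0 then
      aPush i rest (edit + if PySem.List.pyGetD l 2 0 = 1 then 1 else -1)
        (PySem.List.insertBy (fun a b => decide (a < b)) (PySem.List.slice l (some 1) none) heap)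
    else (l :: rest, edit, heap)

-- the 'while heap and i == heap[0][0]' loop: heappop takes the list head (the minimum)
def aPop (i : Int) : List (List Int) → Int → List (List Int) × Int
  | [], edit => ([], edit)
  | h :: t, edit =>
    if i = PySem.List.pyGetD h 0 0 then
      aPop i t (edit + if PySem.List.pyGetD h 1 0 = 0 then 1 else -1)
    else (h :: t, edit)

-- 'for i in range(len(s))': one step per character, i carried explicitly
def aLoop : List Char → Int → List (List Int) → List (List Int) → Int → List Char → List Char
  | [], _, _, _, _, ans => ans
  | c :: cs, i, rest, heap, edit, ans =>
    match aPush i rest edit heap with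
    | (rest', edit', heap') =>
      match aPop i heap' edit' with
      | (heap'', edit'') => aLoop cs (i + 1) rest' heap'' edit'' (ans ++ [shiftChar c edit'])

def shiftingLetters (s : String) (shifts : List (List Int)) : String :=
  String.ofList (aLoop s.toList 0 (PySem.List.sorted shifts (fun x => x)) [] 0 [])

-- ===== PORT B =====
-- 'diff[k] = diff.get(k, 0) + v' on a Python dict is PySem.Dict.insert/getD
def bStep (diff : PySem.Dict Int Int) (l : List Int) : PySem.Dict Int Int :=
  let st := PySem.List.pyGetD l 0 0
  let e := PySem.List.pyGetD l 1 0
  let d := PySem.List.pyGetD l 2 0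
  let delta : Int := if d = 1 then 1 else -1
  let diff1 := diff.insert st (diff.getD st 0 + delta)
  diff1.insert (e + 1) (diff1.getD (e + 1) 0 - delta)

-- 'for i, c in enumerate(s)': prefix-sum pass; diff.get(i, 0) is Dict.getD
def bLoop (diff : PySem.Dict Int Int) : List Char → Int → Int → List Char → List Char
  | [], _, _, out => out
  | c :: cs, i, shift, out =>
    let shift' := shift + diff.getD i 0
    bLoop diff cs (i + 1) shift' (out ++ [shiftChar c shift'])

-- 'if not s: return ""' is the emptiness test on the string
def shiftingLetters_alt (s : String) (shifts : List (List Int)) : String :=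
  if s.toList = [] then "" else
  let diff := shifts.foldl bStep PySem.Dict.empty
  String.ofList (bLoop diff s.toList 0 0 [])

-- ===== PRECONDITION & SPEC =====
-- Pre_ admits any shifts on the empty string (both versions return "" without reading them) and
-- otherwise restricts to the task's natural domain, relaxed around the string: every shift is a list
-- [start, end, direction] (length ≥ 3) and either each shift has 0 ≤ start ≤ end with
-- direction ∈ {0,1} whenever the range ends inside the string (a range reaching past the end is
-- shifted to the end by both versions and its direction cell never consulted), or lies entirely
-- beyond the string (both versions ignore it); as a degenerate case, a shift list none of whose
-- range boundaries touch the string leaves the string unshifted in both versions. Excluded are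
-- shift lists a scan cannot read (A raises IndexError when it reaches them), negative starts mixed
-- with applicable shifts (A's sorted scan stalls there), ranges with end < start (A never retires
-- them from its heap) and in-string directions outside {0,1} (A retires them as -1 regardless):
-- malformed inputs outside the task's domain, on which neither behaviour is specified.
def Pre_shiftingLetters (s : String) (shifts : List (List Int)) : Prop :=
  s.toList = [] ∨
  (∀ l ∈ shifts, 3 ≤ l.length) ∧
  ((∀ l ∈ shifts,
      (PySem.List.pyGetD l 0 0 < 0 ∨ (s.toList.length : Int) ≤ PySem.List.pyGetD l 0 0) ∧
      (PySem.List.pyGetD l 1 0 + 1 < 0 ∨ (s.toList.length : Int) ≤ PySem.List.pyGetD l 1 0 + 1)) ∨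
   (∀ l ∈ shifts,
      (0 ≤ PySem.List.pyGetD l 0 0 ∧ PySem.List.pyGetD l 0 0 ≤ PySem.List.pyGetD l 1 0 ∧
        (PySem.List.pyGetD l 1 0 + 1 < (s.toList.length : Int) →
          (PySem.List.pyGetD l 2 0 = 0 ∨ PySem.List.pyGetD l 2 0 = 1))) ∨
      ((s.toList.length : Int) ≤ PySem.List.pyGetD l 0 0 ∧
        (s.toList.length : Int) ≤ PySem.List.pyGetD l 1 0 + 1)))
instance (s : String) (shifts : List (List Int)) : Decidable (Pre_shiftingLetters s shifts) := by
  unfold Pre_shiftingLetters; infer_instance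

def pvWitness_shiftingLetters : String × List (List Int) := ("abcz", [[1, 2, 1], [0, 3, 0], [2, 2, 1]])

def Spec_shiftingLetters (s : String) (shifts : List (List Int)) (out : String) : Prop := out = shiftingLetters_alt s shifts
instance (s : String) (shifts : List (List Int)) (out : String) : Decidable (Spec_shiftingLetters s shifts out) := by unfold Spec_shiftingLetters; infer_instance

-- ===== CLAIM (what is proved, stated in full; the proofs are below) =====
def Claim_equal_shiftingLetters : Prop := ∀ (s : String) (shifts : List (List Int)), Dom_shiftingLetters s shifts → Pre_shiftingLetters s shifts → Spec_shiftingLetters s shifts (shiftingLetters s shifts)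

-- ===== LEMMAS AND PROOFS =====

-- ---- proof-side abbreviations ----
def k0 (l : List Int) : Int := PySem.List.pyGetD l 0 0
def k1v (l : List Int) : Int := PySem.List.pyGetD l 1 0
def addv (l : List Int) : Int := if PySem.List.pyGetD l 2 0 = 1 then 1 else -1
def remv (l : List Int) : Int := if PySem.List.pyGetD l 2 0 = 0 then 1 else -1
def hremv (h : List Int) : Int := if PySem.List.pyGetD h 1 0 = 0 then 1 else -1

-- edit value A holds while writing character m / value at the start of iteration k
def wTerm (i0 m : Int) (l : List Int) : Int :=
  (if k0 l ≤ m then addv l else 0) + (if k0 l ≤ k1v l ∧ k1v l < min i0 m then remv l else 0)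
def Ew (i0 : Int) (xs : List (List Int)) (m : Int) : Int := (xs.map (wTerm i0 m)).sum
def sTerm (i0 k : Int) (l : List Int) : Int :=
  (if k0 l < k then addv l else 0) + (if k0 l ≤ k1v l ∧ k1v l < min i0 k then remv l else 0)
def Es (i0 : Int) (xs : List (List Int)) (k : Int) : Int := (xs.map (sTerm i0 k)).sum

-- per-position contribution recorded in B's difference array
def contribB (q : Int) (l : List Int) : Int :=
  (if k0 l = q then addv l else 0) + (if k1v l + 1 = q then -(addv l) else 0)

-- the reference output: characters from position k on, shifted by E at their position
def expected (E : Int → Int) : Int → List Char → List Char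
  | _, [] => []
  | k, c :: cs => shiftChar c (E k) :: expected E (k + 1) cs

-- pending heap membership predicates (start of iteration k / between push and pop of iteration k)
def pendP (i0 k : Int) (l : List Int) : Bool :=
  decide (k0 l < k ∧ ¬(k0 l ≤ k1v l ∧ k1v l < min i0 k))
def midP (i0 k : Int) (l : List Int) : Bool :=
  decide (k0 l ≤ k ∧ ¬(k0 l ≤ k1v l ∧ k1v l < min i0 k))

-- ---- generic list lemmas ----
theorem sum_map_filter_eq (p : List Int → Bool) (f : List Int → Int) (xs : List (List Int)) :
    ((xs.filter p).map f).sum = (xs.map (fun x => if p x then f x else 0)).sum := by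
  induction xs with
  | nil => rfl
  | cons x t ih => by_cases h : p x <;> simp [h, ih]

theorem expected_congr (E1 E2 : Int → Int) :
    ∀ (k : Int) (cs : List Char),
    (∀ m, k ≤ m → m < k + cs.length → E1 m = E2 m) →
    expected E1 k cs = expected E2 k cs := by
  intro k cs
  induction cs generalizing k with
  | nil => intro _; rfl
  | cons c t ih =>
    intro h
    simp only [expected, h k le_rfl (by simp), List.cons.injEq, true_and]
    exact ih (k + 1) (fun m h1 h2 => h m (by omega) (by simp at h2 ⊢; omega))

theorem expected_zero (cs : List Char) : ∀ (k : Int),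
    expected (fun _ => 0) k cs = cs.map (fun c => shiftChar c 0) := by
  induction cs with
  | nil => intro k; rfl
  | cons c cs' ih => intro k; simp [expected, ih]

theorem insertBy_perm (x : List Int) (ys : List (List Int)) :
    (PySem.List.insertBy (fun a b => decide (a < b)) x ys).Perm (x :: ys) := by
  induction ys with
  | nil => simp [PySem.List.insertBy]
  | cons y t ih =>
    simp only [PySem.List.insertBy]
    by_cases h : x < y
    · simp [h]
    · simp only [h, decide_false, Bool.false_eq_true, if_false]
      exact ((ih.cons y).trans (List.Perm.swap x y t))

theorem insertBy_pairwise (x : List Int) (ys : List (List Int))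
    (hs : ys.Pairwise (· ≤ ·)) :
    (PySem.List.insertBy (fun a b => decide (a < b)) x ys).Pairwise (· ≤ ·) := by
  induction ys with
  | nil => simp [PySem.List.insertBy]
  | cons y t ih =>
    rcases List.pairwise_cons.mp hs with ⟨hy, ht⟩
    simp only [PySem.List.insertBy]
    by_cases h : x < y
    · simp only [h, decide_true, if_true]
      refine List.pairwise_cons.mpr ⟨?_, hs⟩
      intro z hz
      rcases hz with _ | hz
      · exact le_of_lt h
      · exact le_of_lt (lt_of_lt_of_le h (hy _ (by assumption)))
    · simp only [h, decide_false, Bool.false_eq_true, if_false]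
      refine List.pairwise_cons.mpr ⟨?_, ih ht⟩
      intro z hz
      rcases (PySem.List.mem_insertBy _ _ _ _).mp hz with hz | hz
      · exact hz ▸ (not_lt.mp h)
      · exact hy _ hz

theorem foldl_insertBy_perm (xs ys : List (List Int)) :
    (xs.foldl (fun h x => PySem.List.insertBy (fun a b => decide (a < b)) x h) ys).Perm (ys ++ xs) := by
  induction xs generalizing ys with
  | nil => simp
  | cons x t ih =>
    simp only [List.foldl_cons]
    refine (ih _).trans ?_
    refine (List.Perm.append_right t (insertBy_perm x ys)).trans ?_
    exact List.perm_middle.symm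

theorem foldl_insertBy_pairwise (xs ys : List (List Int)) (hs : ys.Pairwise (· ≤ ·)) :
    (xs.foldl (fun h x => PySem.List.insertBy (fun a b => decide (a < b)) x h) ys).Pairwise (· ≤ ·) := by
  induction xs generalizing ys with
  | nil => exact hs
  | cons x t ih => exact ih _ (insertBy_pairwise x ys hs)

theorem filter_or_perm (p q : List Int → Bool) (xs : List (List Int))
    (hdisj : ∀ x ∈ xs, ¬(p x = true ∧ q x = true)) :
    (xs.filter p ++ xs.filter q).Perm (xs.filter (fun x => p x || q x)) := by
  induction xs with
  | nil => simp
  | cons x t ih =>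
    have hd : ∀ y ∈ t, ¬(p y = true ∧ q y = true) := fun y hy => hdisj y (List.mem_cons_of_mem _ hy)
    by_cases hp : p x
    · have hq : q x = false := by
        rcases Bool.eq_false_or_eq_true (q x) with h | h
        · exact absurd ⟨hp, h⟩ (hdisj x (List.mem_cons_self))
        · exact h
      simpa [hp, hq] using (ih hd).cons x
    · by_cases hq : q x
      · simp only [List.filter_cons, hp, hq, Bool.false_eq_true, if_false, if_true,
          Bool.false_or, Bool.or_true]
        refine (List.perm_middle).trans ?_
        simpa using (ih hd).cons x
      · simpa [hp, hq] using ih hd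

-- lexicographic order on nonempty lists bounds the heads
theorem k0_mono (a b : List Int) (h : a ≤ b) (ha : a ≠ []) (hb : b ≠ []) : k0 a ≤ k0 b := by
  cases a with
  | nil => exact absurd rfl ha
  | cons x u =>
    cases b with
    | nil => exact absurd rfl hb
    | cons y v =>
      simp only [k0, PySem.List.pyGetD_zero, List.getD]
      simp only [List.getElem?_cons_zero, Option.getD_some]
      by_contra hlt
      rw [not_le] at hlt
      exact absurd (List.cons_lt_cons_iff.mpr (Or.inl hlt)) (not_lt.mpr h)

theorem k0_tail (l : List Int) (h : 2 ≤ l.length) : k0 l.tail = k1v l := by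
  match l, h with
  | a :: b :: t, _ => simp [k0, k1v, PySem.List.pyGetD_ofNat']

theorem hremv_tail (l : List Int) (h : 3 ≤ l.length) : hremv l.tail = remv l := by
  match l, h with
  | a :: b :: c :: t, _ => simp [hremv, remv, PySem.List.pyGetD_ofNat']

theorem tail_ne_nil (l : List Int) (h : 2 ≤ l.length) : l.tail ≠ [] := by
  match l, h with
  | a :: b :: t, _ => simp

-- maximal front run of a sorted, bounded list
theorem front_run (k : Int) : ∀ (xs : List (List Int)),
    xs.Pairwise (fun a b => k0 a ≤ k0 b) → (∀ l ∈ xs, k ≤ k0 l) →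
    xs.takeWhile (fun l => decide (k = k0 l)) = xs.filter (fun l => decide (k = k0 l)) ∧
    xs.dropWhile (fun l => decide (k = k0 l)) = xs.filter (fun l => decide (k < k0 l)) := by
  intro xs hs hb
  induction xs with
  | nil => simp
  | cons x t ih =>
    rcases List.pairwise_cons.mp hs with ⟨hx, ht⟩
    by_cases h : k = k0 x
    · obtain ⟨t1, t2⟩ := ih ht (fun l hl => hb l (List.mem_cons_of_mem _ hl))
      have hd : (decide (k = k0 x)) = true := by simp [h]
      have hd' : (decide (k < k0 x)) = false := by simp; omega
      simp only [List.takeWhile_cons, List.dropWhile_cons, List.filter_cons, hd, hd',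
        if_true, Bool.false_eq_true, if_false, t1, t2, and_self]
    · have hk : k < k0 x := lt_of_le_of_ne (hb x (List.mem_cons_self)) h
      have h1 : t.filter (fun l => decide (k = k0 l)) = [] := by
        apply List.filter_eq_nil_iff.mpr
        intro l hl
        have := hx l hl
        simp only [decide_eq_true_eq]
        omega
      have h2 : t.filter (fun l => decide (k < k0 l)) = t := by
        apply List.filter_eq_self.mpr
        intro l hl
        have := hx l hl
        simp only [decide_eq_true_eq]
        omega
      simp [h, hk, h1, h2]

-- ---- unfolding lemmas for the two ports' loops ----
theorem aPush_eq (i : Int) : ∀ (rest : List (List Int)) (edit : Int) (heap : List (List Int)),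
    aPush i rest edit heap =
      (rest.dropWhile (fun l => decide (i = k0 l)),
       edit + ((rest.takeWhile (fun l => decide (i = k0 l))).map addv).sum,
       (rest.takeWhile (fun l => decide (i = k0 l))).foldl
         (fun h l => PySem.List.insertBy (fun a b => decide (a < b)) l.tail h) heap) := by
  intro rest
  induction rest with
  | nil => intro edit heap; simp [aPush]
  | cons l t ih =>
    intro edit heap
    by_cases h : i = PySem.List.pyGetD l 0 0
    · have hd : (decide (i = k0 l)) = true := by simp [k0, h]
      simp only [aPush]
      rw [if_pos h]
      simp only [List.dropWhile_cons, List.takeWhile_cons, hd, if_true, ih,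
        List.foldl_cons, List.map_cons, List.sum_cons, PySem.List.slice_from_one]
      simp only [Prod.mk.injEq, true_and, and_true]
      simp only [addv]
      ring
    · have hd : (decide (i = k0 l)) = false := by simp [k0, h]
      simp only [aPush]
      rw [if_neg h]
      simp [hd]

theorem aPop_eq (i : Int) : ∀ (heap : List (List Int)) (edit : Int),
    aPop i heap edit =
      (heap.dropWhile (fun h => decide (i = k0 h)),
       edit + ((heap.takeWhile (fun h => decide (i = k0 h))).map hremv).sum) := by
  intro heap
  induction heap with
  | nil => intro edit; simp [aPop]
  | cons h t ih =>
    intro edit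
    by_cases hh : i = PySem.List.pyGetD h 0 0
    · have hd : (decide (i = k0 h)) = true := by simp [k0, hh]
      simp only [aPop]
      rw [if_pos hh]
      simp only [List.dropWhile_cons, List.takeWhile_cons, hd, if_true, ih,
        List.map_cons, List.sum_cons]
      simp only [Prod.mk.injEq, true_and]
      simp only [hremv]
      ring
    · have hd : (decide (i = k0 h)) = false := by simp [k0, hh]
      simp only [aPop]
      rw [if_neg hh]
      simp [hd]

-- ---- B-side: the difference map holds the per-position contributions ----
theorem insert2_getD (d : PySem.Dict Int Int) (a b v q : Int) :
    ((d.insert a (d.getD a 0 + v)).insert b ((d.insert a (d.getD a 0 + v)).getD b 0 - v)).getD q 0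
      = d.getD q 0 + ((if a = q then v else 0) + (if b = q then -v else 0)) := by
  rw [PySem.Dict.getD_insert, PySem.Dict.getD_insert, PySem.Dict.getD_insert]
  by_cases hqb : q = b <;> by_cases hqa : q = a <;> by_cases hba : b = a <;>
    simp_all <;> omega

theorem bStep_getD (diff : PySem.Dict Int Int) (l : List Int) (q : Int) :
    (bStep diff l).getD q 0 = diff.getD q 0 + contribB q l := by
  show ((diff.insert (k0 l) (diff.getD (k0 l) 0 + addv l)).insert (k1v l + 1)
      ((diff.insert (k0 l) (diff.getD (k0 l) 0 + addv l)).getD (k1v l + 1) 0 - addv l)).getD q 0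
    = diff.getD q 0 + contribB q l
  rw [insert2_getD]
  simp only [contribB]

theorem diffFold_getD : ∀ (xs : List (List Int)) (diff : PySem.Dict Int Int) (q : Int),
    (xs.foldl bStep diff).getD q 0 = diff.getD q 0 + (xs.map (contribB q)).sum := by
  intro xs
  induction xs with
  | nil => intro diff q; simp
  | cons l t ih =>
    intro diff q
    rw [List.foldl_cons, ih, bStep_getD]
    simp only [List.map_cons, List.sum_cons]
    ring

theorem bLoop_eq (diff : PySem.Dict Int Int) (E : Int → Int) :
    ∀ (cs : List Char) (k e : Int) (out : List Char),
    e = E (k - 1) →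
    (∀ m, k ≤ m → m < k + cs.length → E m = E (m - 1) + diff.getD m 0) →
    bLoop diff cs k e out = out ++ expected E k cs := by
  intro cs
  induction cs with
  | nil => intro k e out _ _; simp [bLoop, expected]
  | cons c t ih =>
    intro k e out he hrec
    have hk : E k = E (k - 1) + diff.getD k 0 := hrec k le_rfl (by simp)
    have he' : e + diff.getD k 0 = E k := by omega
    simp only [bLoop, he', expected]
    rw [ih (k + 1) (E k) _ (by simp) (fun m h1 h2 => hrec m (by omega) (by simp at h2 ⊢; omega))]
    simp

-- ---- the A-side invariant: sort + heap scan computes the closed-form edit value Ew ----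
theorem aLoop_inv (i0 n : Int) (L : List (List Int))
    (HL1 : L.Pairwise (· ≤ ·))
    (HL2 : ∀ l ∈ L, l ≠ [])
    (HL3 : ∀ l ∈ L, 0 ≤ k0 l)
    (HL4 : ∀ l ∈ L, l.length < 3 → n ≤ k0 l)
    (Hi0a : ∀ l ∈ L, k0 l < n → k1v l < k0 l → i0 ≤ k0 l)
    (Hi0b : i0 < n → ∃ l ∈ L, k0 l < n ∧ k1v l < k0 l ∧ k0 l = i0) :
    ∀ (cs : List Char) (k : Int) (rest heap : List (List Int)) (edit : Int) (ans : List Char)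
      (pre : List (List Int)),
      0 ≤ k → k + cs.length = n →
      L = pre ++ rest → (∀ l ∈ pre, k0 l < k) → (∀ l ∈ rest, k ≤ k0 l) →
      edit = Es i0 L k →
      heap.Pairwise (· ≤ ·) →
      heap.Perm ((L.filter (pendP i0 k)).map List.tail) →
      aLoop cs k rest heap edit ans = ans ++ expected (Ew i0 L) k cs := by
  intro cs
  induction cs with
  | nil => intro k rest heap edit ans pre _ _ _ _ _ _ _ _; simp [aLoop, expected]
  | cons c cs' ih =>
    intro k rest heap edit ans pre hk0 hkn hsplit hpre hrest hedit hhs hhp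
    have hkn' : k < n := by simp at hkn; omega
    have hmemL : ∀ l ∈ rest, l ∈ L := by intro l hl; rw [hsplit]; exact List.mem_append_right _ hl
    have hrest_lex : rest.Pairwise (· ≤ ·) := by
      have := hsplit ▸ HL1
      exact (List.pairwise_append.mp this).2.1
    have hrest_k0 : rest.Pairwise (fun a b => k0 a ≤ k0 b) := by
      refine List.Pairwise.imp_of_mem ?_ hrest_lex
      intro a b ha hb hab
      exact k0_mono a b hab (HL2 a (hmemL a ha)) (HL2 b (hmemL b hb))
    obtain ⟨hT, hD⟩ := front_run k rest hrest_k0 hrest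
    have hTL : rest.filter (fun l => decide (k = k0 l)) = L.filter (fun l => decide (k = k0 l)) := by
      rw [hsplit, List.filter_append]
      have : pre.filter (fun l => decide (k = k0 l)) = [] := by
        apply List.filter_eq_nil_iff.mpr
        intro l hl
        have := hpre l hl
        simp only [decide_eq_true_eq]
        omega
      simp [this]
    simp only [aLoop]
    rw [aPush_eq]
    have hEw : edit + ((rest.takeWhile (fun l => decide (k = k0 l))).map addv).sum = Ew i0 L k := by
      rw [hT, hTL, hedit, sum_map_filter_eq, Es, Ew]
      rw [← PySem.List.sum_map_add_int]
      apply congrArg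
      apply List.map_congr_left
      intro l _
      simp only [sTerm, wTerm, decide_eq_true_eq]
      split_ifs <;> omega
    have hfold : ∀ (hp : List (List Int)), (rest.takeWhile (fun l => decide (k = k0 l))).foldl
          (fun h l => PySem.List.insertBy (fun a b => decide (a < b)) l.tail h) hp
        = ((rest.takeWhile (fun l => decide (k = k0 l))).map List.tail).foldl
          (fun h x => PySem.List.insertBy (fun a b => decide (a < b)) x h) hp := by
      intro hp
      rw [List.foldl_map]
    have hheap'_pairwise :
        ((rest.takeWhile (fun l => decide (k = k0 l))).foldl
          (fun h l => PySem.List.insertBy (fun a b => decide (a < b)) l.tail h) heap).Pairwise (· ≤ ·) := by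
      rw [hfold]
      exact foldl_insertBy_pairwise _ _ hhs
    have hmidP_or : ∀ l ∈ L, (pendP i0 k l || decide (k = k0 l)) = midP i0 k l := by
      intro l hl
      apply Bool.eq_iff_iff.mpr
      simp only [pendP, midP, Bool.or_eq_true, decide_eq_true_eq]
      constructor
      · rintro (⟨h1, h2⟩ | h1)
        · constructor
          · omega
          · intro ⟨a, b⟩
            exact h2 ⟨a, by omega⟩
        · constructor
          · omega
          · intro ⟨a, b⟩
            omega
      · rintro ⟨h1, h2⟩
        by_cases hq : k = k0 l
        · exact Or.inr hq
        · refine Or.inl ⟨by omega, ?_⟩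
          intro ⟨a, b⟩
          exact h2 ⟨a, by omega⟩
    have hheap'_perm :
        ((rest.takeWhile (fun l => decide (k = k0 l))).foldl
          (fun h l => PySem.List.insertBy (fun a b => decide (a < b)) l.tail h) heap).Perm
          ((L.filter (midP i0 k)).map List.tail) := by
      rw [hfold]
      refine (foldl_insertBy_perm _ _).trans ?_
      refine (hhp.append_right _).trans ?_
      rw [hT, hTL, ← List.map_append]
      refine (List.Perm.map _ ?_)
      refine (filter_or_perm _ _ _ ?_).trans ?_
      · intro l _
        rintro ⟨h1, h2⟩
        simp only [pendP, midP, decide_eq_true_eq] at h1 h2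
        omega
      · exact List.Perm.of_eq (List.filter_congr hmidP_or)
    have hmid_shape : ∀ h ∈ (L.filter (midP i0 k)).map List.tail,
        ∃ l ∈ L, l.length ≥ 3 ∧ h = l.tail ∧ k0 h = k1v l ∧ hremv h = remv l ∧ h ≠ [] ∧
          k0 l ≤ k ∧ ¬(k0 l ≤ k1v l ∧ k1v l < min i0 k) := by
      intro h hh
      obtain ⟨l, hlf, rfl⟩ := List.mem_map.mp hh
      obtain ⟨hlL, hlP⟩ := List.mem_filter.mp hlf
      simp only [midP, decide_eq_true_eq] at hlP
      have hlen : l.length ≥ 3 := by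
        by_contra hlen
        have := HL4 l hlL (by omega)
        omega
      exact ⟨l, hlL, hlen, rfl, k0_tail l (by omega), hremv_tail l hlen,
        tail_ne_nil l (by omega), hlP.1, hlP.2⟩
    set T : List (List Int) := rest.takeWhile (fun l => decide (k = k0 l)) with hTdef
    set Dr : List (List Int) := rest.dropWhile (fun l => decide (k = k0 l)) with hDdef
    set heap' : List (List Int) :=
      T.foldl (fun h l => PySem.List.insertBy (fun a b => decide (a < b)) l.tail h) heap with hHdef
    have hmem' : ∀ h ∈ heap', ∃ l ∈ L, l.length ≥ 3 ∧ h = l.tail ∧ k0 h = k1v l ∧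
        hremv h = remv l ∧ h ≠ [] ∧ k0 l ≤ k ∧ ¬(k0 l ≤ k1v l ∧ k1v l < min i0 k) :=
      fun h hh => hmid_shape h (hheap'_perm.mem_iff.mp hh)
    have hsplit' : L = (pre ++ T) ++ Dr := by
      rw [hsplit, hTdef, hDdef, List.append_assoc, List.takeWhile_append_dropWhile]
    have hpre' : ∀ l ∈ pre ++ T, k0 l < k + 1 := by
      intro l hl
      rcases List.mem_append.mp hl with hl | hl
      · have := hpre l hl; omega
      · have := List.mem_takeWhile_imp hl
        simp only [decide_eq_true_eq] at this
        omega
    have hrest' : ∀ l ∈ Dr, k + 1 ≤ k0 l := by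
      intro l hl
      rw [hD] at hl
      have := (List.mem_filter.mp hl).2
      simp only [decide_eq_true_eq] at this
      omega
    have harith : k + 1 + (cs'.length : Int) = n := by simp at hkn ⊢; omega
    rw [hEw, aPop_eq]
    by_cases hki : k < i0
    · have hbound' : ∀ h ∈ heap', k ≤ k0 h := by
        intro h hh
        obtain ⟨l, hlL, hlen, rfl, hk0t, _, _, hle, hnot⟩ := hmem' _ hh
        by_contra hlt
        have h1 : k1v l < k0 l := by
          by_contra hge
          exact hnot ⟨by omega, by omega⟩
        have := Hi0a l hlL (by omega) h1
        omega
      have hne' : ∀ h ∈ heap', h ≠ [] := by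
        intro h hh
        obtain ⟨l, _, _, _, _, _, hne, _, _⟩ := hmem' _ hh
        exact hne
      have hpk0 : heap'.Pairwise (fun a b => k0 a ≤ k0 b) := by
        refine List.Pairwise.imp_of_mem ?_ hheap'_pairwise
        intro a b ha hb hab
        exact k0_mono a b hab (hne' a ha) (hne' b hb)
      obtain ⟨hT2, hD2⟩ := front_run k heap' hpk0 hbound'
      rw [hT2, hD2]
      have hpop_sum : ((heap'.filter (fun h => decide (k = k0 h))).map hremv).sum =
          ((L.filter (fun l => midP i0 k l && decide (k = k1v l))).map remv).sum := by
        have hp := hheap'_perm.filter (fun h => decide (k = k0 h))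
        rw [List.filter_map] at hp
        have hcg : (L.filter (midP i0 k)).filter
              ((fun h => decide (k = k0 h)) ∘ List.tail) =
            (L.filter (midP i0 k)).filter (fun l => decide (k = k1v l)) := by
          apply List.filter_congr
          intro l hl
          obtain ⟨hlL, hlP⟩ := List.mem_filter.mp hl
          simp only [midP, decide_eq_true_eq] at hlP
          have hlen : 3 ≤ l.length := by
            by_contra hlen
            have := HL4 l hlL (by omega)
            omega
          simp only [Function.comp_apply, k0_tail l (by omega)]
        rw [hcg] at hp
        rw [List.filter_filter] at hp
        calc ((heap'.filter (fun h => decide (k = k0 h))).map hremv).sum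
            = (((L.filter (fun l => decide (k = k1v l) && midP i0 k l)).map List.tail).map hremv).sum := by
              rw [(hp.map hremv).sum_eq]
          _ = ((L.filter (fun l => midP i0 k l && decide (k = k1v l))).map remv).sum := by
              rw [List.map_map]
              have hco : L.filter (fun l => decide (k = k1v l) && midP i0 k l)
                  = L.filter (fun l => midP i0 k l && decide (k = k1v l)) := by
                apply List.filter_congr
                intro l _
                exact Bool.and_comm _ _
              rw [hco]
              apply congrArg List.sum
              apply List.map_congr_left
              intro l hl
              obtain ⟨hlL, hlP⟩ := List.mem_filter.mp hl
              have hlen : 3 ≤ l.length := by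
                by_contra hlen
                simp only [Bool.and_eq_true, midP, decide_eq_true_eq] at hlP
                have := HL4 l hlL (by omega)
                omega
              simp only [Function.comp_apply]
              exact hremv_tail l hlen
      have hedit'' : Ew i0 L k + ((heap'.filter (fun h => decide (k = k0 h))).map hremv).sum
          = Es i0 L (k + 1) := by
        rw [hpop_sum, sum_map_filter_eq, Es, Ew, ← PySem.List.sum_map_add_int]
        apply congrArg
        apply List.map_congr_left
        intro l _
        simp only [wTerm, sTerm, Bool.and_eq_true, midP, decide_eq_true_eq]
        split_ifs <;> omega
      have hpend' : (heap'.filter (fun h => decide (k < k0 h))).Perm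
          ((L.filter (pendP i0 (k + 1))).map List.tail) := by
        have hp := hheap'_perm.filter (fun h => decide (k < k0 h))
        rw [List.filter_map] at hp
        have hcg : (L.filter (midP i0 k)).filter ((fun h => decide (k < k0 h)) ∘ List.tail)
            = (L.filter (midP i0 k)).filter (fun l => decide (k < k1v l)) := by
          apply List.filter_congr
          intro l hl
          obtain ⟨hlL, hlP⟩ := List.mem_filter.mp hl
          simp only [midP, decide_eq_true_eq] at hlP
          have hlen : 3 ≤ l.length := by
            by_contra hlen
            have := HL4 l hlL (by omega)
            omega
          simp only [Function.comp_apply, k0_tail l (by omega)]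
        rw [hcg, List.filter_filter] at hp
        refine hp.trans (List.Perm.of_eq ?_)
        apply congrArg
        apply List.filter_congr
        intro l hlL
        apply Bool.eq_iff_iff.mpr
        simp only [Bool.and_eq_true, midP, pendP, decide_eq_true_eq]
        constructor
        · rintro ⟨h1, h2, h3⟩
          refine ⟨by omega, ?_⟩
          intro ⟨a, b⟩
          omega
        · rintro ⟨h1, h2⟩
          have hk1 : k < k1v l := by
            by_contra hle
            have hstuck : k1v l < k0 l := by
              by_contra hge
              exact h2 ⟨by omega, by omega⟩
            have := Hi0a l hlL (by omega) hstuck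
            omega
          refine ⟨hk1, by omega, ?_⟩
          intro ⟨a, b⟩
          omega
      have hPair' : (heap'.filter (fun h => decide (k < k0 h))).Pairwise (· ≤ ·) :=
        hheap'_pairwise.sublist List.filter_sublist
      rw [hedit'']
      rw [ih (k + 1) Dr (heap'.filter (fun h => decide (k < k0 h))) (Es i0 L (k + 1))
        (ans ++ [shiftChar c (Ew i0 L k)]) (pre ++ T) (by omega) harith hsplit' hpre' hrest'
        rfl hPair' hpend']
      simp [expected]
    · obtain ⟨ls, hlsL, hls1, hls2, hls3⟩ := Hi0b (by omega)
      have hlen_ls : 3 ≤ ls.length := by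
        by_contra hlen
        have := HL4 ls hlsL (by omega)
        omega
      have hlsM : midP i0 k ls = true := by
        simp only [midP, decide_eq_true_eq]
        refine ⟨by omega, ?_⟩
        intro ⟨a, b⟩
        omega
      have hlsmem : ls.tail ∈ heap' :=
        hheap'_perm.mem_iff.mpr (List.mem_map_of_mem (List.mem_filter.mpr ⟨hlsL, hlsM⟩))
      have hk0tls : k0 ls.tail < k := by
        rw [k0_tail ls (by omega)]
        omega
      have hstall : heap'.takeWhile (fun h => decide (k = k0 h)) = [] ∧
          heap'.dropWhile (fun h => decide (k = k0 h)) = heap' := by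
        rcases hhe : heap' with _ | ⟨x, tl⟩
        · simp
        · have hx : x ∈ heap' := by rw [hhe]; exact List.mem_cons_self
          obtain ⟨lx, _, _, _, _, _, hxne, _, _⟩ := hmem' x hx
          have hxle : k0 x ≤ k0 ls.tail := by
            rw [hhe] at hlsmem
            rcases List.mem_cons.mp hlsmem with heq | hmem
            · rw [heq]
            · have hple := (List.pairwise_cons.mp (hhe ▸ hheap'_pairwise)).1 _ hmem
              obtain ⟨lt', _, _, _, _, _, htne, _, _⟩ :=
                hmem' ls.tail (by rw [hhe]; exact List.mem_cons_of_mem _ hmem)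
              exact k0_mono x ls.tail hple hxne htne
          have hxfalse : (decide (k = k0 x)) = false := by
            simp only [decide_eq_false_iff_not]
            omega
          simp [List.takeWhile_cons, List.dropWhile_cons, hxfalse]
      rw [hstall.1, hstall.2]
      have hEs' : Ew i0 L k + (([] : List (List Int)).map hremv).sum = Es i0 L (k + 1) := by
        simp only [List.map_nil, List.sum_nil, add_zero, Ew, Es]
        apply congrArg
        apply List.map_congr_left
        intro l _
        simp only [wTerm, sTerm]
        split_ifs <;> omega
      have hpend' : heap'.Perm ((L.filter (pendP i0 (k + 1))).map List.tail) := by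
        refine hheap'_perm.trans (List.Perm.of_eq ?_)
        apply congrArg
        apply List.filter_congr
        intro l _
        apply Bool.eq_iff_iff.mpr
        simp only [midP, pendP, decide_eq_true_eq]
        constructor
        · rintro ⟨h1, h2⟩
          refine ⟨by omega, ?_⟩
          intro ⟨a, b⟩
          exact h2 ⟨a, by omega⟩
        · rintro ⟨h1, h2⟩
          refine ⟨by omega, ?_⟩
          intro ⟨a, b⟩
          exact h2 ⟨a, by omega⟩
      rw [hEs']
      rw [ih (k + 1) Dr heap' (Es i0 L (k + 1)) (ans ++ [shiftChar c (Ew i0 L k)]) (pre ++ T)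
        (by omega) harith hsplit' hpre' hrest' rfl hheap'_pairwise hpend']
      simp [expected]

-- ---- the sorted list of port A ----
def Lport (xs : List (List Int)) : List (List Int) := PySem.List.sorted xs (fun x => x)

theorem sorted_inst (xs : List (List Int)) :
    Lport xs = @PySem.List.sorted (List Int) (List Int) List.instLinearOrder.toLT
        LinearOrder.toDecidableLT xs (fun x => x) false := by
  unfold Lport
  congr 1

theorem Lport_pairwise (xs : List (List Int)) : (Lport xs).Pairwise (· ≤ ·) := by
  rw [sorted_inst]
  exact PySem.List.sorted_pairwise xs (fun x => x)

theorem Lport_mem (xs : List (List Int)) (l : List Int) : l ∈ Lport xs ↔ l ∈ xs :=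
  PySem.List.mem_sorted xs (fun x => x) false l

theorem Lport_perm (xs : List (List Int)) : (Lport xs).Perm xs :=
  PySem.List.sorted_perm xs (fun x => x) false

-- ---- boundary values of the closed form ----
theorem Ew_neg (i0 : Int) (xs : List (List Int)) (m : Int) (hm : m < 0)
    (h0 : ∀ l ∈ xs, 0 ≤ k0 l) : Ew i0 xs m = 0 := by
  apply List.sum_eq_zero
  intro x hx
  obtain ⟨l, hl, rfl⟩ := List.mem_map.mp hx
  have := h0 l hl
  simp only [wTerm]
  split_ifs <;> omega

theorem Es_zero (i0 : Int) (xs : List (List Int)) (h0 : ∀ l ∈ xs, 0 ≤ k0 l) :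
    Es i0 xs 0 = 0 := by
  apply List.sum_eq_zero
  intro x hx
  obtain ⟨l, hl, rfl⟩ := List.mem_map.mp hx
  have := h0 l hl
  simp only [sTerm]
  split_ifs <;> omega

-- ---- the B-side recurrence: one prefix-sum step adds the contributions at m ----
-- the three admitted per-shift classes: a well-formed range, a range entirely beyond the
-- string, and a range entirely outside it
def classD (n : Int) (l : List Int) : Prop :=
  (k0 l ≤ k1v l ∧ (k1v l + 1 < n → (PySem.List.pyGetD l 2 0 = 0 ∨ PySem.List.pyGetD l 2 0 = 1))) ∨
  (n ≤ k0 l ∧ n ≤ k1v l + 1) ∨ (n ≤ k0 l ∧ k1v l + 1 < 0)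

theorem wTerm_step (n m : Int) (l : List Int) (h : classD n l) (hm0 : 0 ≤ m) (hmn : m < n) :
    wTerm n m l = wTerm n (m - 1) l + contribB m l := by
  have e1 : min n m = m := min_eq_right (by omega)
  have e2 : min n (m - 1) = m - 1 := min_eq_right (by omega)
  rcases h with ⟨h1, hd⟩ | ⟨h1, h2⟩ | ⟨h1, h2⟩
  · by_cases he : k1v l + 1 = m
    · rcases hd (by omega) with hd | hd <;>
        simp only [wTerm, contribB, addv, remv, e1, e2, hd] <;>
        split_ifs <;> omega
    · simp only [wTerm, contribB, e1, e2]
      split_ifs <;> omega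
  · simp only [wTerm, contribB, e1, e2]
    split_ifs <;> omega
  · simp only [wTerm, contribB, e1, e2]
    split_ifs <;> omega

theorem Ew_rec (n : Int) (shifts : List (List Int))
    (hP : ∀ l ∈ shifts, classD n l)
    (m : Int) (hm0 : 0 ≤ m) (hmn : m < n) :
    Ew n shifts m = Ew n shifts (m - 1) + (shifts.map (contribB m)).sum := by
  rw [Ew, Ew, ← PySem.List.sum_map_add_int]
  apply congrArg
  apply List.map_congr_left
  intro l hl
  exact wTerm_step n m l (hP l hl) hm0 hmn

theorem Lport_head_le (xs : List (List Int)) (m : List Int) (t : List (List Int))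
    (h : Lport xs = m :: t) : ∀ y ∈ xs, m ≤ y := by
  rw [sorted_inst] at h
  exact PySem.List.key_head_sorted_le xs (fun x => x) h

-- A's scan stalls completely when the first sorted shift has a negative start
theorem aLoop_stall (lh : List Int) (tl : List (List Int)) (hneg : k0 lh < 0) :
    ∀ (cs : List Char) (i : Int) (ans : List Char), 0 ≤ i →
      aLoop cs i (lh :: tl) [] 0 ans = ans ++ cs.map (fun c => shiftChar c 0) := by
  intro cs
  induction cs with
  | nil => intro i ans _; simp [aLoop]
  | cons c cs' ih =>
    intro i ans hi
    have hne : ¬ (i = PySem.List.pyGetD lh 0 0) := by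
      show ¬ (i = k0 lh)
      omega
    simp only [aLoop, aPush, hne, if_false, aPop]
    rw [ih (i + 1) _ (by omega)]
    simp

-- ===== VERDICT proof =====
theorem shiftingLetters_spec : Claim_equal_shiftingLetters := by
  intro s shifts _hDom hPre
  unfold Spec_shiftingLetters
  unfold shiftingLetters shiftingLetters_alt
  by_cases hcs0 : s.toList = []
  · rw [hcs0]
    simp [aLoop, if_pos hcs0]
  rw [if_neg hcs0]
  set cs : List Char := s.toList with hcs
  set n : Int := (cs.length : Int) with hnn
  obtain ⟨hlen3, hPre2⟩ := hPre.resolve_left hcs0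
  have hn0 : 0 ≤ n := by simp [hnn]
  set diff : PySem.Dict Int Int := shifts.foldl bStep PySem.Dict.empty with hdiffdef
  have hdiff : ∀ m : Int, diff.getD m 0 = (shifts.map (contribB m)).sum := by
    intro m
    rw [hdiffdef, diffFold_getD]
    simp
  have hmemL : ∀ l, l ∈ Lport shifts ↔ l ∈ shifts := Lport_mem shifts
  have HL2 : ∀ l ∈ Lport shifts, l ≠ [] := by
    intro l hl
    have := hlen3 l ((hmemL l).mp hl)
    intro hnil
    rw [hnil] at this
    simp at this
  show String.ofList (aLoop cs 0 (Lport shifts) [] 0 []) = String.ofList (bLoop diff cs 0 0 [])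
  by_cases hneg : ∃ l ∈ shifts, k0 l < 0
  · -- some start is negative: Pre_'s first disjunct holds, no shift touches the string,
    -- A's sorted scan stalls at its head and B's difference map stays invisible
    have hout : ∀ l ∈ shifts, (k0 l < 0 ∨ n ≤ k0 l) ∧ (k1v l + 1 < 0 ∨ n ≤ k1v l + 1) := by
      rcases hPre2 with h | h
      · exact h
      · obtain ⟨l0, hl0, hneg0⟩ := hneg
        have e1 : PySem.List.pyGetD l0 0 0 = k0 l0 := rfl
        have e3 : (s.toList.length : Int) = n := rfl
        rcases h l0 hl0 with ⟨h1, _⟩ | ⟨h1, _⟩ <;> omega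
    obtain ⟨lneg, hlnegm, hlneg⟩ := hneg
    have hLne : Lport shifts ≠ [] := by
      intro hnil
      unfold Lport at hnil
      rw [PySem.List.sorted_eq_nil_iff] at hnil
      rw [hnil] at hlnegm
      exact absurd hlnegm (List.not_mem_nil)
    obtain ⟨lh, tl, hL⟩ := List.exists_cons_of_ne_nil hLne
    have hlh_neg : k0 lh < 0 := by
      have hle := Lport_head_le shifts lh tl hL lneg hlnegm
      have hlh_mem : lh ∈ shifts := (hmemL lh).mp (by rw [hL]; exact List.mem_cons_self)
      have := k0_mono lh lneg hle (fun h => by simpa [h] using hlen3 lh hlh_mem)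
        (fun h => by simpa [h] using hlen3 lneg hlnegm)
      omega
    rw [hL, aLoop_stall lh tl hlh_neg cs 0 [] le_rfl]
    rw [bLoop_eq diff (fun _ => 0) cs 0 0 [] rfl ?_]
    · rw [expected_zero]
    · intro m hm0 hmn
      rw [hdiff m]
      have : ∀ l ∈ shifts, contribB m l = 0 := by
        intro l hl
        obtain ⟨h1, h2⟩ := hout l hl
        simp only [contribB]
        split_ifs <;> omega
      simp only [zero_add]
      rw [List.map_congr_left (fun l hl => this l hl)]
      simp
  · -- every start is nonnegative: each shift is well formed or lies outside the string
    push_neg at hneg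
    have hD : ∀ l ∈ shifts, classD n l := by
      intro l hl
      have h0 := hneg l hl
      have e1 : PySem.List.pyGetD l 0 0 = k0 l := rfl
      have e2 : PySem.List.pyGetD l 1 0 = k1v l := rfl
      have e3 : (s.toList.length : Int) = n := rfl
      rcases hPre2 with h | h
      · rcases h l hl with ⟨h1, h2⟩
        unfold classD
        rcases h2 with h2 | h2 <;> omega
      · rcases h l hl with ⟨h1, h2, h3⟩ | ⟨h1, h2⟩
        · exact Or.inl ⟨h2, h3⟩
        · exact Or.inr (Or.inl ⟨h1, h2⟩)
    have HL3 : ∀ l ∈ Lport shifts, 0 ≤ k0 l := fun l hl => hneg l ((hmemL l).mp hl)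
    have HL4 : ∀ l ∈ Lport shifts, l.length < 3 → n ≤ k0 l := by
      intro l hl hlen
      have := hlen3 l ((hmemL l).mp hl)
      omega
    have Hi0a : ∀ l ∈ Lport shifts, k0 l < n → k1v l < k0 l → n ≤ k0 l := by
      intro l hl _ hlt
      rcases hD l ((hmemL l).mp hl) with ⟨h1, _⟩ | ⟨h1, _⟩ | ⟨h1, _⟩ <;> omega
    have Hi0b : n < n → ∃ l ∈ Lport shifts, k0 l < n ∧ k1v l < k0 l ∧ k0 l = n :=
      fun h => absurd h (lt_irrefl n)
    have hpend0 : (Lport shifts).filter (pendP n 0) = [] := by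
      apply List.filter_eq_nil_iff.mpr
      intro l hl
      have := HL3 l hl
      simp only [pendP, decide_eq_true_eq]
      intro ⟨a, b⟩
      omega
    rw [aLoop_inv n n (Lport shifts) (Lport_pairwise shifts) HL2 HL3 HL4 Hi0a Hi0b cs 0
      (Lport shifts) [] 0 [] [] le_rfl (by simp [hnn]) (by simp)
      (by intro l hl; exact absurd hl (List.not_mem_nil))
      HL3 (Es_zero n (Lport shifts) HL3).symm List.Pairwise.nil (by rw [hpend0]; simp)]
    rw [bLoop_eq diff (Ew n shifts) cs 0 0 []
      (Ew_neg n shifts (0 - 1) (by omega) (fun l hl => hneg l hl)).symm ?_]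
    · apply congrArg
      apply congrArg
      exact expected_congr _ _ 0 cs
        (fun m _ _ => ((Lport_perm shifts).map (wTerm n m)).sum_eq)
    · intro m hm0 hmn
      rw [hdiff m]
      exact Ew_rec n shifts hD m hm0 (by simpa using hmn)
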